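-- pv_equiv track=rewrite | github.com/eliottcassidy2000/math | 04-computation/coherent_amplification_theory.py | additive_energy
-- ===== SOURCE A (Python) =====
-- def additive_energy(S, p):
--     count = 0
--     sums = {}
--     for a in S:
--         for b in S:
--             s = (a + b) % p
--             sums[s] = sums.get(s, 0) + 1
--     return sum(v*v for v in sums.values())
-- ===== SOURCE B (Python) =====
-- def additive_energy(S, p):
--     # sort all pairwise sums mod p, then one run-length scan summing squared run lengths
--     keys = sorted((a + b) % p for a in S for b in S)
--     total, prev, run = 0, None, 0
--     for k in keys:
--         if k == prev:
--             run += 1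
--         else:
--             total += run * run
--             prev, run = k, 1
--     return total + run * run
-- ===== Notes on version B (the rewrite author's own statement) =====
-- stated objective: alternative
-- what changed: B replaces A's hash-dict counting of pairwise residue sums by sorting the list of all pairwise sums and doing one run-length scan that accumulates squared run lengths; no dictionary is used at all.
import Mathlib
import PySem

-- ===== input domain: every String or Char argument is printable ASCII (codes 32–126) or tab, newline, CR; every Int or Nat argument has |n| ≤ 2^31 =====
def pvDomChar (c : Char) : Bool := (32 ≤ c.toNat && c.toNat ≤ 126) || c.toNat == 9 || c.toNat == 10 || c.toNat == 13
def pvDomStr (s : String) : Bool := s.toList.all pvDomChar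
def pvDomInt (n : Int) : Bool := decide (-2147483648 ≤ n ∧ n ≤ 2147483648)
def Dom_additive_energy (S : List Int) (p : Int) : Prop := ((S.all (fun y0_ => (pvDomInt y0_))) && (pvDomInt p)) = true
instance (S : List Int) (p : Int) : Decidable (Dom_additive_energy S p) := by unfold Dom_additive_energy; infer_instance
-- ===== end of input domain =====

-- B replaces A's hash-dict counting of pairwise residue sums by sorting the list of all
-- pairwise sums and doing one run-length scan that sums squared run lengths (no dict at all).

-- ===== PORT A =====
def additive_energy (S : List Int) (p : Int) : Int :=
  let sums : PySem.Dict Int Int :=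
    S.foldl (fun d a =>
      S.foldl (fun d b =>
        let s := PySem.Int.mod (a + b) p
        d.insert s (d.getD s 0 + 1)) d) PySem.Dict.empty
  (sums.values.map (fun v => v * v)).sum

-- ===== PORT B =====
def additive_energy_alt (S : List Int) (p : Int) : Int :=
  let keys := PySem.List.sorted
    (S.flatMap (fun a => S.map (fun b => PySem.Int.mod (a + b) p))) (fun x => x) false
  let st := keys.foldl
    (fun (st : Int × Option Int × Int) k =>
      if st.2.1 == some k then (st.1, st.2.1, st.2.2 + 1)
      else (st.1 + st.2.2 * st.2.2, some k, 1))
    ((0 : Int), (none : Option Int), (0 : Int))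
  st.1 + st.2.2 * st.2.2

-- ===== PRECONDITION & SPEC =====
-- Python raises ZeroDivisionError on '% p' with p = 0 whenever S is nonempty; both programs return 0 on S = [].
def Pre_additive_energy (S : List Int) (p : Int) : Prop := p ≠ 0 ∨ S = []
instance (S : List Int) (p : Int) : Decidable (Pre_additive_energy S p) := by unfold Pre_additive_energy; infer_instance
def pvWitness_additive_energy : List Int × Int := ([0, 1, 4, 1], 3)

def Spec_additive_energy (S : List Int) (p : Int) (out : Int) : Prop := out = additive_energy_alt S p
instance (S : List Int) (p : Int) (out : Int) : Decidable (Spec_additive_energy S p out) := by unfold Spec_additive_energy; infer_instance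

-- ===== CLAIM (what is proved, stated in full; the proofs are below) =====
def Claim_equal_additive_energy : Prop := ∀ (S : List Int) (p : Int), Dom_additive_energy S p → Pre_additive_energy S p → Spec_additive_energy S p (additive_energy S p)

-- ===== LEMMAS AND PROOFS =====

-- proof-side abbreviations
def pvPA (S : List Int) : List (Int × Int) := S.flatMap (fun a => S.map (fun b => (a, b)))
def pvKeyA (p : Int) (x : Int × Int) : Int := PySem.Int.mod (x.1 + x.2) p
def pvL (S : List Int) (p : Int) : List Int := (pvPA S).map (pvKeyA p)
def pvStep (st : Int × Option Int × Int) (k : Int) : Int × Option Int × Int :=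
  if st.2.1 == some k then (st.1, st.2.1, st.2.2 + 1)
  else (st.1 + st.2.2 * st.2.2, some k, 1)
def pvSumSq (l : List Int) : Int :=
  ((PySem.Set.ofList l).map (fun s => (l.count s : Int) * (l.count s : Int))).sum
def pvFinish (st : Int × Option Int × Int) : Int := st.1 + st.2.2 * st.2.2

-- a nested for-loop over l1 × l2 is one fold over the list of pairs
theorem pv_foldl_nested {α β γ : Type} (l1 : List α) (l2 : List β) (f : γ → α → β → γ) (init : γ) :
    l1.foldl (fun d a => l2.foldl (fun d b => f d a b) d) init
      = (l1.flatMap (fun a => l2.map (fun b => (a, b)))).foldl (fun d x => f d x.1 x.2) init := by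
  induction l1 generalizing init with
  | nil => rfl
  | cons x t ih => simp [List.foldl_append, List.foldl_map, ih]

-- lookup after a counting loop
theorem pv_getD_fold_insert {ε : Type} (l : List ε) (key : ε → Int)
    (d : PySem.Dict Int Int) (v : Int) :
    (l.foldl (fun d x => d.insert (key x) (d.getD (key x) 0 + 1)) d).getD v 0
      = d.getD v 0 + (((l.filter (fun x => key x == v)).map (fun _ => (1 : Int))).sum) := by
  induction l generalizing d with
  | nil => simp
  | cons x t ih =>
      simp only [List.foldl_cons, ih, List.filter_cons]
      by_cases h : key x = v
      · simp [h]; ring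
      · simp [h, PySem.Dict.getD_insert, Ne.symm h]

theorem pv_keys_fold_insert {ε : Type} (l : List ε) (key : ε → Int) :
    (l.foldl (fun d x => d.insert (key x) (d.getD (key x) 0 + 1))
        (PySem.Dict.empty : PySem.Dict Int Int)).keys
      = PySem.Set.ofList (l.map key) := by
  rw [PySem.Dict.keys_foldl_insert_key]
  simp [PySem.Set.update, PySem.Set.ofList_eq_foldl]

theorem pv_nodup_keys_fold_insert {ε : Type} (l : List ε) (key : ε → Int) :
    (l.foldl (fun d x => d.insert (key x) (d.getD (key x) 0 + 1))
        (PySem.Dict.empty : PySem.Dict Int Int)).keys.Nodup := by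
  exact PySem.Dict.nodup_keys_foldl_insert_key l key _ _ PySem.Dict.nodup_keys_empty

theorem pv_perm_of_nodup (l1 l2 : List Int) (h1 : l1.Nodup) (h2 : l2.Nodup)
    (h : ∀ x, x ∈ l1 ↔ x ∈ l2) : l1.Perm l2 := by
  exact (List.perm_ext_iff_of_nodup h1 h2).mpr h

-- a filtered sum of ones is a count
theorem pv_filter_one_count {ε : Type} (l : List ε) (f : ε → Int) (u : Int) :
    ((l.filter (fun x => f x == u)).map (fun _ => (1 : Int))).sum = ((l.map f).count u : Int) := by
  have h1 : ((l.filter (fun x => f x == u)).map (fun _ => (1 : Int))).sum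
      = ((l.filter (fun x => f x == u)).length : Int) := by
    induction l.filter (fun x => f x == u) with
    | nil => rfl
    | cons x t ih => simp; omega
  have h2 : (l.filter (fun x => f x == u)).length = (l.map f).count u := by
    rw [List.count, List.countP_map, List.countP_eq_length_filter]
    simp [Function.comp_def]
  rw [h1, h2]

-- A computes the count-squared sum over the distinct pairwise residue sums
theorem pv_A_char (S : List Int) (p : Int) : additive_energy S p = pvSumSq (pvL S p) := by
  have h1 : (S.foldl (fun d a => S.foldl (fun d b =>
              d.insert (PySem.Int.mod (a + b) p) (d.getD (PySem.Int.mod (a + b) p) 0 + 1)) d)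
              (PySem.Dict.empty : PySem.Dict Int Int))
      = (pvPA S).foldl (fun d x => d.insert (pvKeyA p x) (d.getD (pvKeyA p x) 0 + 1))
          PySem.Dict.empty :=
    pv_foldl_nested S S (fun d a b => d.insert (PySem.Int.mod (a + b) p) (d.getD (PySem.Int.mod (a + b) p) 0 + (1:Int))) PySem.Dict.empty
  show (((S.foldl (fun d a => S.foldl (fun d b =>
          d.insert (PySem.Int.mod (a + b) p) (d.getD (PySem.Int.mod (a + b) p) 0 + 1)) d)
          (PySem.Dict.empty : PySem.Dict Int Int)).values).map (fun v => v * v)).sum = _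
  rw [h1]
  have hnd : ((pvPA S).foldl (fun d x => d.insert (pvKeyA p x) (d.getD (pvKeyA p x) 0 + 1))
      (PySem.Dict.empty : PySem.Dict Int Int)).keys.Nodup :=
    pv_nodup_keys_fold_insert (pvPA S) (pvKeyA p)
  have hkeys : ((pvPA S).foldl (fun d x => d.insert (pvKeyA p x) (d.getD (pvKeyA p x) 0 + 1))
      (PySem.Dict.empty : PySem.Dict Int Int)).keys = PySem.Set.ofList (pvL S p) :=
    pv_keys_fold_insert (pvPA S) (pvKeyA p)
  have hget : ∀ v, ((pvPA S).foldl (fun d x => d.insert (pvKeyA p x) (d.getD (pvKeyA p x) 0 + 1))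
      (PySem.Dict.empty : PySem.Dict Int Int)).getD v 0 = ((pvL S p).count v : Int) := by
    intro v
    have h := pv_getD_fold_insert (pvPA S) (pvKeyA p) PySem.Dict.empty v
    have h2 := pv_filter_one_count (pvPA S) (pvKeyA p) v
    simp only [PySem.Dict.getD_empty, zero_add] at h
    exact h.trans h2
  rw [PySem.Dict.values_eq_map_keys _ hnd 0, hkeys, List.map_map, pvSumSq]
  apply congrArg
  apply List.map_congr_left
  intro s _
  simp [hget s]

-- the count-squared sum only depends on the multiset of elements
theorem pv_sumSq_perm (l1 l2 : List Int) (h : l1.Perm l2) : pvSumSq l1 = pvSumSq l2 := by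
  have hperm : (PySem.Set.ofList l1).Perm (PySem.Set.ofList l2) := by
    apply pv_perm_of_nodup _ _ (PySem.Set.nodup_ofList _) (PySem.Set.nodup_ofList _)
    intro x
    rw [PySem.Set.mem_ofList, PySem.Set.mem_ofList]
    exact h.mem_iff
  calc pvSumSq l1
      = ((PySem.Set.ofList l1).map (fun s => (l2.count s : Int) * (l2.count s : Int))).sum := by
        unfold pvSumSq
        apply congrArg
        apply List.map_congr_left
        intro s _
        rw [h.count_eq]
    _ = pvSumSq l2 := (hperm.map _).sum_eq

-- peeling the first run off the count-squared sum
theorem pv_sumSq_cons (k : Int) (rest : List Int) :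
    pvSumSq (k :: rest)
      = (1 + (rest.count k : Int)) * (1 + (rest.count k : Int))
          + pvSumSq (rest.filter (fun x => x ≠ k)) := by
  have hMne : ∀ s ∈ PySem.Set.ofList (rest.filter (fun x => x ≠ k)), s ≠ k := by
    intro s hs
    have := (PySem.Set.mem_ofList _ _).mp hs
    have := List.mem_filter.mp this
    simpa using this.2
  have hkM : k ∉ PySem.Set.ofList (rest.filter (fun x => x ≠ k)) := by
    intro hk
    exact (hMne k hk) rfl
  have hperm : (PySem.Set.ofList (k :: rest)).Perm
      (k :: PySem.Set.ofList (rest.filter (fun x => x ≠ k))) := by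
    apply pv_perm_of_nodup _ _ (PySem.Set.nodup_ofList _)
      (List.nodup_cons.mpr ⟨hkM, PySem.Set.nodup_ofList _⟩)
    intro x
    constructor
    · intro hx
      have hx' := (PySem.Set.mem_ofList _ _).mp hx
      rcases List.mem_cons.mp hx' with h | h
      · exact h ▸ List.mem_cons_self
      · by_cases hxk : x = k
        · exact hxk ▸ List.mem_cons_self
        · exact List.mem_cons_of_mem _
            ((PySem.Set.mem_ofList _ _).mpr (List.mem_filter.mpr ⟨h, by simpa using hxk⟩))
    · intro hx
      apply (PySem.Set.mem_ofList _ _).mpr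
      rcases List.mem_cons.mp hx with h | h
      · exact h ▸ List.mem_cons_self
      · exact List.mem_cons_of_mem _ (List.mem_filter.mp ((PySem.Set.mem_ofList _ _).mp h)).1
  have hcount : ∀ s ∈ PySem.Set.ofList (rest.filter (fun x => x ≠ k)),
      (k :: rest).count s = (rest.filter (fun x => x ≠ k)).count s := by
    intro s hs
    have hne := hMne s hs
    have h1 : List.count s (k :: rest) = List.count s rest := by
      rw [List.count_cons]; simp [Ne.symm hne]
    have h2 : List.count s (rest.filter (fun x => x ≠ k)) = List.count s rest :=
      List.count_filter (by simpa using hne)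
    rw [h1, h2]
  calc pvSumSq (k :: rest)
      = ((k :: PySem.Set.ofList (rest.filter (fun x => x ≠ k))).map
          (fun s => ((k :: rest).count s : Int) * ((k :: rest).count s : Int))).sum := by
        unfold pvSumSq
        exact (hperm.map _).sum_eq
    _ = _ := by
        rw [List.map_cons, List.sum_cons, List.count_cons_self]
        have h1 : ((rest.count k + 1 : Nat) : Int) = 1 + (rest.count k : Int) := by
          push_cast; ring
        rw [h1]
        congr 1
        unfold pvSumSq
        apply congrArg
        apply List.map_congr_left
        intro s hs
        rw [hcount s hs]

-- run-length scan invariant: from state (t, some v, r) on a sorted tail whose elements are ≥ v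
theorem pv_scan_inv (l : List Int) (hs : l.Pairwise (· ≤ ·)) (v t r : Int)
    (hge : ∀ x ∈ l, v ≤ x) :
    pvFinish (l.foldl pvStep (t, some v, r))
      = t + (r + (l.count v : Int)) * (r + (l.count v : Int))
          + pvSumSq (l.filter (fun x => x ≠ v)) := by
  induction l generalizing v t r with
  | nil => simp [pvFinish, pvSumSq]
  | cons k rest ih =>
    have hs' : rest.Pairwise (· ≤ ·) := (List.pairwise_cons.mp hs).2
    have hk_le : ∀ x ∈ rest, k ≤ x := (List.pairwise_cons.mp hs).1
    by_cases hkv : k = v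
    · subst hkv
      have hstep : pvStep (t, some k, r) k = (t, some k, r + 1) := by
        simp [pvStep]
      have hfv : (k :: rest).filter (fun x => x ≠ k) = rest.filter (fun x => x ≠ k) := by
        simp
      rw [List.foldl_cons, hstep, ih hs' k t (r + 1) hk_le, List.count_cons_self, hfv]
      push_cast
      ring_nf
    · have hvk : v < k := lt_of_le_of_ne (hge k List.mem_cons_self) (fun h => hkv h.symm)
      have hb : ((some v : Option Int) == some k) = false := by
        have hvk' : v ≠ k := fun h => hkv h.symm
        simp [hvk']
      have hstep : pvStep (t, some v, r) k = (t + r * r, some k, 1) := by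
        simp [pvStep, hb]
      rw [List.foldl_cons, hstep, ih hs' k (t + r * r) 1 hk_le]
      have hvnotin : v ∉ (k :: rest) := by
        intro hv
        rcases List.mem_cons.mp hv with h | h
        · exact hkv h.symm
        · exact absurd hvk (not_lt.mpr (hk_le v h))
      have hc0 : (k :: rest).count v = 0 := List.count_eq_zero.mpr hvnotin
      have hfilt : (k :: rest).filter (fun x => x ≠ v) = k :: rest := by
        apply List.filter_eq_self.mpr
        intro x hx
        simp only [ne_eq, decide_eq_true_eq]
        intro hxv
        exact hvnotin (hxv ▸ hx)
      rw [hc0, hfilt, pv_sumSq_cons]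
      push_cast
      ring_nf

-- the full scan on a sorted list computes the count-squared sum
theorem pv_scan_sorted (l : List Int) (hs : l.Pairwise (· ≤ ·)) :
    pvFinish (l.foldl pvStep ((0 : Int), (none : Option Int), (0 : Int))) = pvSumSq l := by
  cases l with
  | nil => simp [pvFinish, pvSumSq]
  | cons k rest =>
    have hs' : rest.Pairwise (· ≤ ·) := (List.pairwise_cons.mp hs).2
    have hk_le : ∀ x ∈ rest, k ≤ x := (List.pairwise_cons.mp hs).1
    have hstep : pvStep (0, none, 0) k = (0, some k, 1) := by simp [pvStep]
    rw [List.foldl_cons, hstep, pv_scan_inv rest hs' k 0 1 hk_le, pv_sumSq_cons]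
    ring_nf

-- ===== VERDICT (by name: the statement is the Claim_ definition above) =====
theorem additive_energy_spec : Claim_equal_additive_energy := by
  intro S p _hdom _hpre
  unfold Spec_additive_energy
  rw [pv_A_char]
  unfold additive_energy_alt
  have hLeq : S.flatMap (fun a => S.map (fun b => PySem.Int.mod (a + b) p)) = pvL S p := by
    unfold pvL pvPA pvKeyA
    simp [List.map_flatMap, List.map_map, Function.comp_def]
  simp only [hLeq]
  have hsorted : (PySem.List.sorted (pvL S p) (fun x => x) false).Pairwise (· ≤ ·) := by
    have := PySem.List.sorted_pairwise (pvL S p) (fun x => x)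
    simpa using this
  have hfold : ((PySem.List.sorted (pvL S p) (fun x => x) false).foldl
      (fun (st : Int × Option Int × Int) k =>
        if st.2.1 == some k then (st.1, st.2.1, st.2.2 + 1)
        else (st.1 + st.2.2 * st.2.2, some k, 1))
      ((0 : Int), (none : Option Int), (0 : Int)))
      = (PySem.List.sorted (pvL S p) (fun x => x) false).foldl pvStep
          ((0 : Int), (none : Option Int), (0 : Int)) := rfl
  rw [hfold]
  have := pv_scan_sorted (PySem.List.sorted (pvL S p) (fun x => x) false) hsorted
  unfold pvFinish at this
  rw [this]
  exact (pv_sumSq_perm _ _ (PySem.List.sorted_perm (pvL S p) (fun x => x) false)).symm
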